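-- pv_equiv track=rewrite | github.com/rhmvvCYB3R/CSA_SCRIPTS | FXP-SIMPLE.py | negate_u2
-- ===== SOURCE A (Python) =====
-- def negate_u2(binary_str):
--     """Negates a number in U2 (Two's Complement) code and determines NZVC."""
--     bits = len(binary_str)
--
--     # Handle the special case of the most negative number (-2^(bits-1))
--     # E.g., for 8-bit, 10000000 (-128). Its negation (+128) cannot be represented.
--     if binary_str[0] == '1' and binary_str[1:] == '0' * (bits - 1):
--         negated_val_bin = binary_str # Remains itself, or is an error condition
--
--         N = 1 # Still negative
--         Z = 0 # Not zero
--         V = 1 # Overflow occurs because positive equivalent is out of range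
--         C = 0 # No carry out for standard negation interpretation
--
--         return negated_val_bin, N, Z, V, C
--
--     # 1. Invert all bits (One's Complement)
--     inverted_bits = ''.join(['1' if bit == '0' else '0' for bit in binary_str])
--
--     # 2. Add 1 to the result (mimic add_binary for this specific addition)
--     # We convert to int, add 1, then convert back to binary string of correct length
--     temp_sum = int(inverted_bits, 2) + 1
--     negated_val_bin = bin(temp_sum)[2:].zfill(bits)
--
--     # If adding 1 results in an extra bit (e.g., 0111 (+7) becomes 1000 (-8)),
--     # this extra bit is implicitly truncated for U2 negation.
--     if len(negated_val_bin) > bits: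
--         negated_val_bin = negated_val_bin[-bits:]
--
--     # Determine NZVC conditions for general negation in U2
--     N = int(negated_val_bin[0]) # N: Sign of the result
--     Z = 1 if int(negated_val_bin, 2) == 0 else 0 # Z: Is result zero?
--     V = 0 # V: For all other cases besides the most negative number, V=0.
--     C = 0 # C: Carry flag for negation is typically 0.
--
--     return negated_val_bin, N, Z, V, C
-- ===== SOURCE B (Python) =====
-- def negate_u2(binary_str):
--     """Negates a number in U2 (Two's Complement) code and determines NZVC."""
--     first = binary_str[0]
--     bits = len(binary_str)
--     value = 0
--     for c in binary_str:
--         value = (value << 1) | (c != '0')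
--     negated = (-value) % (1 << bits)
--     result = format(negated, 'b').zfill(bits)
--     N = int(result[0])
--     Z = 1 if negated == 0 else 0
--     V = 1 if first == '1' and negated == value and value != 0 else 0
--     return result, N, Z, V, 0
-- ===== Notes on version B (the rewrite author's own statement) =====
-- stated objective: simpler
-- what changed: Replaces the invert-bits string comprehension, the add-1/zfill/truncate dance and the separate most-negative-number branch by one fold computing the value, a single modular negation (-value) % (1<<bits), and uniform flag formulas (V = first=='1' and negated==value and value!=0 subsumes the special case).
import Mathlib
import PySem

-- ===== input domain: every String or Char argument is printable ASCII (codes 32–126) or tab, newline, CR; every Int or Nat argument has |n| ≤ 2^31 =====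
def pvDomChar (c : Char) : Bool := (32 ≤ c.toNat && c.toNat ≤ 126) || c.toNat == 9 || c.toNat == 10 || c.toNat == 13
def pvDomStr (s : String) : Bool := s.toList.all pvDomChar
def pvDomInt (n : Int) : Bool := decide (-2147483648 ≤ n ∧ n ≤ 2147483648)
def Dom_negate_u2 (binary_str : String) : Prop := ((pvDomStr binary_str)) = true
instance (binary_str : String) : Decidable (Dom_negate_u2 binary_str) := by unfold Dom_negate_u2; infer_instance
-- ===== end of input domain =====

-- B simplifies A: one fold for the value, one modular negation (-value) % (1<<bits),
-- and uniform flag formulas subsuming A's separate most-negative-number branch.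

-- bin(n)[2:] for n > 0 (empty for 0); helper for the bin/format builtin both Pythons call
def pvBinAux (n : Nat) : List Char :=
  if _hn : n = 0 then [] else pvBinAux (n / 2) ++ [if n % 2 = 1 then '1' else '0']
decreasing_by exact Nat.div_lt_self (Nat.pos_of_ne_zero _hn) (by omega)

-- bin(n)[2:] / format(n, 'b') for n ≥ 0
def pvBin (n : Nat) : List Char := if n = 0 then ['0'] else pvBinAux n

-- int(cs, 2) for cs consisting only of '0'/'1' (exact on that domain; both ports only
-- apply it to such strings, which A guarantees by construction)
def pvParseBin (cs : List Char) : Nat :=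
  cs.foldl (fun a c => 2 * a + (if c = '1' then 1 else 0)) 0

-- ===== PORT A =====
def negate_u2 (binary_str : String) : String × Int × Int × Int × Int :=
  let l := binary_str.toList
  let bits := l.length
  match PySem.Str.pyGet? binary_str 0 with
  | none => ("", 0, 0, 0, 0)  -- binary_str[0] raises IndexError (outside Pre_)
  | some c0 =>
    if c0 = '1' ∧ PySem.List.slice l (some 1) none = List.replicate (bits - 1) '0' then
      (binary_str, 1, 0, 1, 0)
    else
      let inverted := l.map (fun bit => if bit = '0' then '1' else '0')
      let temp_sum := pvParseBin inverted + 1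
      let nv0 := pvBin temp_sum                                  -- bin(temp_sum)[2:]
      let nv1 := List.replicate (bits - nv0.length) '0' ++ nv0   -- .zfill(bits)
      let nv := if bits < nv1.length then nv1.drop (nv1.length - bits) else nv1  -- [-bits:]
      -- int(nv[0]): nv is nonempty and all '0'/'1' here, so this is exact
      let N : Int := if PySem.List.pyGet? nv 0 = some '1' then 1 else 0
      let Z : Int := if pvParseBin nv = 0 then 1 else 0
      (String.ofList nv, N, Z, 0, 0)

-- ===== PORT B =====
def negate_u2_alt (binary_str : String) : String × Int × Int × Int × Int :=
  match PySem.Str.pyGet? binary_str 0 with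
  | none => ("", 0, 0, 0, 0)  -- binary_str[0] raises IndexError (outside Pre_)
  | some first =>
    let l := binary_str.toList
    let bits := l.length
    let value : Nat := l.foldl (fun a c => 2 * a + (if c ≠ '0' then 1 else 0)) 0
    let negated : Int := PySem.Int.mod (-(value : Int)) (2 ^ bits)   -- (-value) % (1 << bits)
    let result := List.replicate (bits - (pvBin negated.toNat).length) '0' ++ pvBin negated.toNat  -- format(negated,'b').zfill(bits)
    -- int(result[0]): result is nonempty and all '0'/'1' here, so this is exact
    let N : Int := if PySem.List.pyGet? result 0 = some '1' then 1 else 0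
    let Z : Int := if negated = 0 then 1 else 0
    let V : Int := if first = '1' ∧ negated = (value : Int) ∧ value ≠ 0 then 1 else 0
    (String.ofList result, N, Z, V, 0)

-- ===== PRECONDITION & SPEC =====
-- Pre_ excludes only the empty string, on which A raises IndexError (binary_str[0]).
def Pre_negate_u2 (binary_str : String) : Prop := binary_str ≠ ""
instance (binary_str : String) : Decidable (Pre_negate_u2 binary_str) := by
  unfold Pre_negate_u2; infer_instance
def pvWitness_negate_u2 : String := "10"

def Spec_negate_u2 (binary_str : String) (out : String × Int × Int × Int × Int) : Prop := out = negate_u2_alt binary_str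
instance (binary_str : String) (out : String × Int × Int × Int × Int) : Decidable (Spec_negate_u2 binary_str out) := by unfold Spec_negate_u2; infer_instance

-- ===== CLAIM (what is proved, stated in full; the proofs are below) =====
def Claim_equal_negate_u2 : Prop := ∀ (binary_str : String), Dom_negate_u2 binary_str → Pre_negate_u2 binary_str → Spec_negate_u2 binary_str (negate_u2 binary_str)

-- ===== LEMMAS AND PROOFS =====

-- shift lemma for base-2 digit folds
theorem pv_foldl_shift (d : Char → Nat) : ∀ (t : List Char) (a : Nat),
    t.foldl (fun a c => 2 * a + d c) a
      = a * 2 ^ t.length + t.foldl (fun a c => 2 * a + d c) 0 := by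
  intro t
  induction t with
  | nil => intro a; simp
  | cons c t ih =>
    intro a
    simp only [List.foldl_cons, List.length_cons]
    rw [ih (2 * a + d c), ih (2 * 0 + d c)]
    ring

-- A's one's-complement value and B's value sum to 2^bits - 1
theorem pv_sum (l : List Char) :
    l.foldl (fun a c => 2 * a + (if c = '0' then 1 else 0)) 0
      + l.foldl (fun a c => 2 * a + (if c ≠ '0' then 1 else 0)) 0 + 1
      = 2 ^ l.length := by
  induction l with
  | nil => simp
  | cons c t ih =>
    simp only [List.foldl_cons, List.length_cons]
    rw [pv_foldl_shift (fun c => if c = '0' then 1 else 0),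
        pv_foldl_shift (fun c => if c ≠ '0' then 1 else 0), pow_succ]
    by_cases hc : c = '0'
    · rw [if_pos hc, if_neg (by simp [hc])]; omega
    · rw [if_neg hc, if_pos hc]; omega

theorem pv_hval_lt (l : List Char) :
    l.foldl (fun a c => 2 * a + (if c ≠ '0' then 1 else 0)) 0 < 2 ^ l.length := by
  have := pv_sum l; omega

-- parsing the inverted string = folding the '0'-indicator over the original
theorem pv_map_inv (l : List Char) : ∀ a : Nat,
    (l.map (fun bit => if bit = '0' then '1' else '0')).foldl
        (fun a c => 2 * a + (if c = '1' then 1 else 0)) a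
      = l.foldl (fun a c => 2 * a + (if c = '0' then 1 else 0)) a := by
  induction l with
  | nil => intro a; simp
  | cons c t ih => intro a; by_cases hc : c = '0' <;> simp [hc, ih]

theorem pv_parse_binaux : ∀ (m : Nat) (a : Nat),
    (pvBinAux m).foldl (fun a c => 2 * a + (if c = '1' then 1 else 0)) a
      = a * 2 ^ (pvBinAux m).length + m := by
  intro m
  induction m using Nat.strong_induction_on with
  | _ m ih =>
    intro a
    by_cases hm : m = 0
    · simp [pvBinAux, hm]
    · rw [pvBinAux, dif_neg hm]
      rw [List.foldl_append, List.length_append]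
      simp only [List.foldl_cons, List.foldl_nil, List.length_cons, List.length_nil]
      rw [ih (m / 2) (Nat.div_lt_self (Nat.pos_of_ne_zero hm) (by omega)) a]
      rw [pow_succ, ← mul_assoc]
      have h2 := Nat.div_add_mod m 2
      rcases Nat.mod_two_eq_zero_or_one m with h | h <;> simp [h] <;> omega

theorem pv_length_binaux : ∀ (k m : Nat), m < 2 ^ k → (pvBinAux m).length ≤ k := by
  intro k
  induction k with
  | zero => intro m hm; interval_cases m; simp [pvBinAux]
  | succ k ih =>
    intro m hm
    by_cases hm0 : m = 0
    · simp [pvBinAux, hm0]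
    · rw [pvBinAux, dif_neg hm0]
      simp only [List.length_append, List.length_cons, List.length_nil]
      have : m / 2 < 2 ^ k := by
        have : (2:Nat) ^ (k+1) = 2 * 2 ^ k := by ring
        omega
      have := ih (m / 2) this
      omega

theorem pv_binaux_pow : ∀ k : Nat, pvBinAux (2 ^ k) = '1' :: List.replicate k '0' := by
  intro k
  induction k with
  | zero => simp [pvBinAux]
  | succ k ih =>
    rw [pvBinAux, dif_neg (by positivity)]
    have hdiv : 2 ^ (k + 1) / 2 = 2 ^ k := by
      rw [pow_succ]; exact Nat.mul_div_cancel _ (by omega)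
    have hmod : 2 ^ (k + 1) % 2 = 0 := by
      rw [pow_succ]; exact Nat.mul_mod_left _ _
    rw [hdiv, hmod, ih]
    simp [List.replicate_succ']

theorem pv_h_replicate : ∀ (k a : Nat),
    (List.replicate k '0').foldl (fun a c => 2 * a + (if c ≠ '0' then 1 else 0)) a
      = a * 2 ^ k := by
  intro k
  induction k with
  | zero => intro a; simp
  | succ k ih =>
    intro a
    simp only [List.replicate_succ, List.foldl_cons]
    rw [ih]
    simp [pow_succ]; ring

theorem pv_h_zero : ∀ l : List Char,
    l.foldl (fun a c => 2 * a + (if c ≠ '0' then 1 else 0)) 0 = 0 →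
    l = List.replicate l.length '0' := by
  intro l
  induction l with
  | nil => simp
  | cons c t ih =>
    intro h
    simp only [List.foldl_cons] at h
    rw [pv_foldl_shift (fun c => if c ≠ '0' then 1 else 0)] at h
    have hc : (2 * 0 + (if c ≠ '0' then 1 else 0)) = 0 := by
      by_contra hne
      have : 1 ≤ (2 * 0 + (if c ≠ '0' then 1 else 0)) := by omega
      nlinarith [Nat.one_le_two_pow (n := t.length)]
    have hc0 : c = '0' := by by_cases h0 : c = '0' <;> simp [h0] at hc ⊢
    have ht := ih (by omega)
    simp [List.replicate_succ, hc0, ← ht]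

theorem pv_parse_pad (j : Nat) (u : List Char) :
    (List.replicate j '0' ++ u).foldl (fun a c => 2 * a + (if c = '1' then 1 else 0)) 0
      = u.foldl (fun a c => 2 * a + (if c = '1' then 1 else 0)) 0 := by
  rw [List.foldl_append]
  congr 1
  induction j with
  | zero => simp
  | succ j ih => simp [List.replicate_succ, ih]

-- Python's (-v) % 2^b for 0 < v ≤ 2^b
theorem pv_mod_neg (v : Int) (b : Nat) (h0 : 0 < v) (h1 : v ≤ 2 ^ b) :
    PySem.Int.mod (-v) (2 ^ b) = 2 ^ b - v := by
  rw [PySem.Int.mod_eq_emod_of_pos (by positivity)]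
  have h : (-v) % (2 ^ b : Int) = ((2 ^ b - v) - 2 ^ b) % (2 ^ b) := by ring_nf
  rw [h, Int.sub_emod_right, Int.emod_eq_of_lt (by omega) (by omega)]

-- ===== VERDICT (by name: the statement is the Claim_ definition above) =====
theorem negate_u2_spec : Claim_equal_negate_u2 := by
  intro s _hdom hpre
  unfold Spec_negate_u2
  obtain ⟨c, t, hl⟩ : ∃ c t, s.toList = c :: t := by
    cases h : s.toList with
    | nil =>
      exfalso; apply hpre
      have := congrArg String.ofList h
      simpa using this
    | cons c t => exact ⟨c, t, rfl⟩
  have hget : PySem.Str.pyGet? s 0 = some c := by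
    simp [PySem.Str.pyGet?, hl]
  have hp : (2:Nat) ^ (t.length + 1) = 2 * 2 ^ t.length := by ring
  have hsum := pv_sum (c :: t)
  have hvlt := pv_hval_lt (c :: t)
  simp only [List.length_cons] at hsum hvlt
  simp only [negate_u2, negate_u2_alt, hget, hl, PySem.List.slice_from_one,
    List.tail_cons, List.length_cons, Nat.add_sub_cancel]
  have hG : pvParseBin ((c :: t).map (fun bit => if bit = '0' then '1' else '0'))
      = (c :: t).foldl (fun a c => 2 * a + (if c = '0' then 1 else 0)) 0 := by
    simp only [pvParseBin]; exact pv_map_inv (c :: t) 0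
  by_cases hsp : c = '1' ∧ t = List.replicate t.length '0'
  · -- most-negative special case
    rw [if_pos hsp]
    obtain ⟨hc, ht⟩ := hsp
    have hv : (c :: t).foldl (fun a c => 2 * a + (if c ≠ '0' then 1 else 0)) 0
        = 2 ^ t.length := by
      simp only [List.foldl_cons, hc]
      rw [show (2 * 0 + (if ('1':Char) ≠ '0' then 1 else 0)) = 1 by decide]
      conv_lhs => rw [ht]
      rw [pv_h_replicate, one_mul]
    have hvne : (2:Nat) ^ t.length ≠ 0 := by positivity
    have hneg : PySem.Int.mod (-((2 ^ t.length : Nat) : Int)) (2 ^ (t.length + 1))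
        = ((2 ^ t.length : Nat) : Int) := by
      rw [pv_mod_neg _ _ (by positivity)
        (by exact_mod_cast (show (2:Nat) ^ t.length ≤ 2 ^ (t.length + 1) by omega))]
      rw [show ((2:Int) ^ (t.length + 1)) = 2 * 2 ^ t.length by ring]
      push_cast; ring
    rw [hv, hneg]
    simp only [Int.toNat_natCast, pvBin, if_neg hvne, pv_binaux_pow]
    have hlen : ('1' :: List.replicate t.length '0').length = t.length + 1 := by simp
    rw [hlen, Nat.sub_self]
    simp only [List.replicate_zero, List.nil_append]
    have hs : String.ofList ('1' :: List.replicate t.length '0') = s := by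
      rw [← hc, ← ht, ← hl]; simp
    simp [hs, hc]
  · -- general case
    rw [if_neg hsp, hG]
    set g0 := (c :: t).foldl (fun a c => 2 * a + (if c = '0' then 1 else 0)) 0 with hg0
    set v0 := (c :: t).foldl (fun a c => 2 * a + (if c ≠ '0' then 1 else 0)) 0 with hv0
    by_cases hz : v0 = 0
    · -- value 0: the string is all '0'
      have hall := pv_h_zero (c :: t) (by rw [← hv0]; exact hz)
      simp only [List.length_cons, List.replicate_succ] at hall
      have hc0 : c = '0' := (List.cons.injEq .. ▸ hall).1
      have ht0 : t = List.replicate t.length '0' := (List.cons.injEq .. ▸ hall).2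
      have htemp : g0 + 1 = 2 ^ (t.length + 1) := by omega
      have hneg : PySem.Int.mod (-((v0 : Nat) : Int)) (2 ^ (t.length + 1)) = 0 := by
        rw [hz, PySem.Int.mod_eq_emod_of_pos (by positivity)]; simp
      rw [htemp, hneg]
      have h2ne : (2:Nat) ^ (t.length + 1) ≠ 0 := by positivity
      have hb0 : pvBin (Int.toNat 0) = ['0'] := rfl
      rw [hb0]
      simp only [pvBin, if_neg h2ne, pv_binaux_pow]
      have hlen : ('1' :: List.replicate (t.length + 1) '0').length = t.length + 2 := by simp
      rw [hlen, Nat.sub_eq_zero_of_le (by omega)]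
      simp only [List.replicate_zero, List.nil_append, List.length_cons,
        List.length_replicate]
      rw [if_pos (show t.length + 1 < t.length + 1 + 1 by omega)]
      rw [show t.length + 1 + 1 - (t.length + 1) = 1 by omega]
      simp only [List.drop_one, List.tail_cons]
      simp only [List.length_nil, Nat.zero_add]
      have hpad : List.replicate (t.length + 1 - 1) '0' ++ ['0']
          = List.replicate (t.length + 1) '0' := by
        simp [← List.replicate_succ']
      simp only [hpad]
      have hN : PySem.List.pyGet? (List.replicate (t.length + 1) '0') 0 = some '0' := by
        simp [List.replicate_succ]
      rw [hN]
      have hZ : pvParseBin (List.replicate (t.length + 1) '0') = 0 := by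
        simpa [pvParseBin] using pv_parse_pad (t.length + 1) []
      rw [hZ]
      simp [hz]
    · -- value ≠ 0: no truncation, negation is 2^bits - value
      have hneg : PySem.Int.mod (-((v0 : Nat) : Int)) (2 ^ (t.length + 1))
          = ((2 ^ (t.length + 1) - v0 : Nat) : Int) := by
        rw [pv_mod_neg _ _ (by exact_mod_cast Nat.pos_of_ne_zero hz) (by exact_mod_cast le_of_lt hvlt)]
        push_cast [Nat.cast_sub (le_of_lt hvlt)]; ring
      set m := 2 ^ (t.length + 1) - v0 with hm
      have hmne : m ≠ 0 := by omega
      have hmlt : m < 2 ^ (t.length + 1) := by omega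
      have htemp : g0 + 1 = m := by omega
      rw [htemp, hneg, Int.toNat_natCast]
      simp only [pvBin, if_neg hmne]
      have hL := pv_length_binaux (t.length + 1) m hmlt
      have hlen1 : (List.replicate (t.length + 1 - (pvBinAux m).length) '0'
          ++ pvBinAux m).length = t.length + 1 := by
        simp [List.length_append]; omega
      rw [if_neg (by rw [hlen1]; omega)]
      have hZ : pvParseBin (List.replicate (t.length + 1 - (pvBinAux m).length) '0'
          ++ pvBinAux m) = m := by
        simp only [pvParseBin]
        rw [pv_parse_pad, pv_parse_binaux m 0]
        ring
      rw [hZ, if_neg hmne]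
      rw [if_neg (show ¬ ((m : Nat) : Int) = 0 by exact_mod_cast hmne)]
      have hV : ¬ (c = '1' ∧ ((m : Nat) : Int) = ((v0 : Nat) : Int) ∧ v0 ≠ 0) := by
        rintro ⟨hc1, hmv, -⟩
        have hmv' : m = v0 := by exact_mod_cast hmv
        have hv2 : v0 = 2 ^ t.length := by omega
        have : v0 = 2 ^ t.length + t.foldl (fun a c => 2 * a + (if c ≠ '0' then 1 else 0)) 0 := by
          rw [hv0]
          simp only [List.foldl_cons, hc1]
          rw [show (2 * 0 + (if ('1':Char) ≠ '0' then 1 else 0)) = 1 by decide]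
          rw [pv_foldl_shift (fun c => if c ≠ '0' then 1 else 0) t 1, one_mul]
        have ht0 : t.foldl (fun a c => 2 * a + (if c ≠ '0' then 1 else 0)) 0 = 0 := by omega
        exact hsp ⟨hc1, by simpa using pv_h_zero t ht0⟩
      rw [if_neg hV]
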